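-- pv_equiv track=rewrite | github.com/Justinocholi/Scratch-world- | # encrypting bits into cipher text.py | star_dollar_decrypt
-- ===== SOURCE A (Python) =====
-- star_dollar_map = {
--     'A': '$1',
--     'B': '*1',
--     'C': '$$1',
--     'D': '**1',
--     'E': '$$$1',
--     'F': '****1',
--     'G': '$$$$1',
--     'H': '*****1',
--     'I': '$$$$$1',
--     'J': '******1',
--     'K': '$$$$$$1',
--     'L': '********1',
--     'M': '$$$$$$$$1',
--     'N': '*********1',
--     'O': '$$$$$$$$$1',
--     'P': '**********1',
--     'Q': '$$$$$$$$$$1',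
--     'R': '***********1',
--     'S': '$$$$$$$$$$$1',
--     'T': '*************1',
--     'U': '$$$$$$$$$$$$$1',
--     'V': '**************1',
--     'W': '$$$$$$$$$$$$$$1',
--     'X': '***************1',
--     'Y': '$$$$$$$$$$$$$$$$1',
--     'Z': '****************1',
--     'a': '$2',
--     'b': '*2',
--     'c': '$$2',
--     'd': '**2',
--     'e': '$$$2',
--     'f': '****2',
--     'g': '$$$$2',
--     'h': '*****2',
--     'i': '$$$$$2',
--     'j': '******2',
--     'k': '$$$$$$2',
--     'l': '********2',
--     'm': '$$$$$$$$2',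
--     'n': '*********2',
--     'o': '$$$$$$$$$2',
--     'p': '**********2',
--     'q': '$$$$$$$$$$2',
--     'r': '***********2',
--     's': '$$$$$$$$$$$2',
--     't': '*************2',
--     'u': '$$$$$$$$$$$$$2',
--     'v': '**************2',
--     'w': '$$$$$$$$$$$$$$2',
--     'x': '***************2',
--     'y': '$$$$$$$$$$$$$$$$2',
--     'z': '****************2',
--
-- }
--
-- def star_dollar_decrypt(text):
--     decrypted_text = ''
--     i = 0
--     while i < len(text):
--         found = False
--         for char, symbol in star_dollar_map.items():
--             if text[i:i+len(symbol)] == symbol: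
--                 decrypted_text += char
--                 i += len(symbol)
--                 found = True
--                 break
--         if not found:
--             decrypted_text += text[i]
--             i += 1
--     return decrypted_text
-- ===== SOURCE B (Python) =====
-- # Run-length strategy -- group the text into maximal runs once, then decode run by run.
-- # A run of star or dollar characters of length L followed by a digit decodes greedily: the largest valid
-- # count k <= L is the symbol (at most one symbol can end at the digit), the L-k leftover
-- # characters are copied verbatim -- exactly A's copy-one-and-retry behaviour.
-- # The letter is computed arithmetically from the index of k in the ascending count list.
--
-- _COUNTS = {'$': [1, 2, 3, 4, 5, 6, 8, 9, 10, 11, 13, 14, 16],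
--            '*': [1, 2, 4, 5, 6, 8, 9, 10, 11, 13, 14, 15, 16]}
--
--
-- def star_dollar_decrypt(text):
--     # pass 1: run-length encode
--     runs = []
--     i = 0
--     while i < len(text):
--         j = i
--         while j < len(text) and text[j] == text[i]:
--             j += 1
--         runs.append([text[i], j - i])
--         i = j
--     # pass 2: decode run by run
--     out = []
--     i = 0
--     while i < len(runs):
--         c, L = runs[i]
--         if (c == '$' or c == '*') and i + 1 < len(runs) and runs[i + 1][0] in ('1', '2'):
--             counts = _COUNTS[c]
--             d = runs[i + 1][0]
--             k, idx = 1, 0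
--             for j, kk in enumerate(counts):
--                 if kk <= L:
--                     k, idx = kk, j
--             base = 65 if d == '1' else 97
--             out.append(c * (L - k))
--             out.append(chr(base + 2 * idx + (1 if c == '*' else 0)))
--             if runs[i + 1][1] == 1:
--                 i += 2
--             else:
--                 runs[i + 1][1] -= 1
--                 i += 1
--         else:
--             out.append(c * L)
--             i += 1
--     return ''.join(out)
-- ===== Notes on version B (the rewrite author's own statement) =====
-- stated objective: faster
-- what changed: Replaces A's per-position scan of all 52 symbol strings (each compared by slicing) with a two-pass run-length decoder: the text is grouped into maximal runs once, and each star/dollar run followed by a digit is decoded in one step by taking the largest valid symbol count at most the run length (valid because at most one symbol can end at the digit, and A's copy-one-and-retry peels a run down to exactly that count).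
import Mathlib
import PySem

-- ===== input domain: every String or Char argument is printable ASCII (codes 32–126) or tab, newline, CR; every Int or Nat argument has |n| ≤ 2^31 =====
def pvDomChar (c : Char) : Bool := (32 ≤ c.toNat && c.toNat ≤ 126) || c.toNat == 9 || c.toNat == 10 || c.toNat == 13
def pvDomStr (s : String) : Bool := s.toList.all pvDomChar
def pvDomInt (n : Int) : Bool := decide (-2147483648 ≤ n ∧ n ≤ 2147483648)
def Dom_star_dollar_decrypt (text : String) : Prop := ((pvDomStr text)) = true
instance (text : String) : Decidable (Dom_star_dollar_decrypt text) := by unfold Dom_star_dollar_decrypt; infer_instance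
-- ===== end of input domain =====

-- B replaces A's per-position scan over all 52 symbol strings by a two-pass run-length decoder:
-- group the text into maximal runs once, then decode each star/dollar run before a digit in one
-- step (largest valid symbol count ≤ the run length; the leftover characters are copied verbatim).

-- ===== PORT A =====
-- A's module-level dict star_dollar_map, as an insertion-ordered association list (keys are single chars).
def star_dollar_pairs : List (Char × List Char) := [
  ('A', ['$', '1']),
  ('B', ['*', '1']),
  ('C', ['$', '$', '1']),
  ('D', ['*', '*', '1']),
  ('E', ['$', '$', '$', '1']),
  ('F', ['*', '*', '*', '*', '1']),
  ('G', ['$', '$', '$', '$', '1']),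
  ('H', ['*', '*', '*', '*', '*', '1']),
  ('I', ['$', '$', '$', '$', '$', '1']),
  ('J', ['*', '*', '*', '*', '*', '*', '1']),
  ('K', ['$', '$', '$', '$', '$', '$', '1']),
  ('L', ['*', '*', '*', '*', '*', '*', '*', '*', '1']),
  ('M', ['$', '$', '$', '$', '$', '$', '$', '$', '1']),
  ('N', ['*', '*', '*', '*', '*', '*', '*', '*', '*', '1']),
  ('O', ['$', '$', '$', '$', '$', '$', '$', '$', '$', '1']),
  ('P', ['*', '*', '*', '*', '*', '*', '*', '*', '*', '*', '1']),
  ('Q', ['$', '$', '$', '$', '$', '$', '$', '$', '$', '$', '1']),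
  ('R', ['*', '*', '*', '*', '*', '*', '*', '*', '*', '*', '*', '1']),
  ('S', ['$', '$', '$', '$', '$', '$', '$', '$', '$', '$', '$', '1']),
  ('T', ['*', '*', '*', '*', '*', '*', '*', '*', '*', '*', '*', '*', '*', '1']),
  ('U', ['$', '$', '$', '$', '$', '$', '$', '$', '$', '$', '$', '$', '$', '1']),
  ('V', ['*', '*', '*', '*', '*', '*', '*', '*', '*', '*', '*', '*', '*', '*', '1']),
  ('W', ['$', '$', '$', '$', '$', '$', '$', '$', '$', '$', '$', '$', '$', '$', '1']),
  ('X', ['*', '*', '*', '*', '*', '*', '*', '*', '*', '*', '*', '*', '*', '*', '*', '1']),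
  ('Y', ['$', '$', '$', '$', '$', '$', '$', '$', '$', '$', '$', '$', '$', '$', '$', '$', '1']),
  ('Z', ['*', '*', '*', '*', '*', '*', '*', '*', '*', '*', '*', '*', '*', '*', '*', '*', '1']),
  ('a', ['$', '2']),
  ('b', ['*', '2']),
  ('c', ['$', '$', '2']),
  ('d', ['*', '*', '2']),
  ('e', ['$', '$', '$', '2']),
  ('f', ['*', '*', '*', '*', '2']),
  ('g', ['$', '$', '$', '$', '2']),
  ('h', ['*', '*', '*', '*', '*', '2']),
  ('i', ['$', '$', '$', '$', '$', '2']),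
  ('j', ['*', '*', '*', '*', '*', '*', '2']),
  ('k', ['$', '$', '$', '$', '$', '$', '2']),
  ('l', ['*', '*', '*', '*', '*', '*', '*', '*', '2']),
  ('m', ['$', '$', '$', '$', '$', '$', '$', '$', '2']),
  ('n', ['*', '*', '*', '*', '*', '*', '*', '*', '*', '2']),
  ('o', ['$', '$', '$', '$', '$', '$', '$', '$', '$', '2']),
  ('p', ['*', '*', '*', '*', '*', '*', '*', '*', '*', '*', '2']),
  ('q', ['$', '$', '$', '$', '$', '$', '$', '$', '$', '$', '2']),
  ('r', ['*', '*', '*', '*', '*', '*', '*', '*', '*', '*', '*', '2']),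
  ('s', ['$', '$', '$', '$', '$', '$', '$', '$', '$', '$', '$', '2']),
  ('t', ['*', '*', '*', '*', '*', '*', '*', '*', '*', '*', '*', '*', '*', '2']),
  ('u', ['$', '$', '$', '$', '$', '$', '$', '$', '$', '$', '$', '$', '$', '2']),
  ('v', ['*', '*', '*', '*', '*', '*', '*', '*', '*', '*', '*', '*', '*', '*', '2']),
  ('w', ['$', '$', '$', '$', '$', '$', '$', '$', '$', '$', '$', '$', '$', '$', '2']),
  ('x', ['*', '*', '*', '*', '*', '*', '*', '*', '*', '*', '*', '*', '*', '*', '*', '2']),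
  ('y', ['$', '$', '$', '$', '$', '$', '$', '$', '$', '$', '$', '$', '$', '$', '$', '$', '2']),
  ('z', ['*', '*', '*', '*', '*', '*', '*', '*', '*', '*', '*', '*', '*', '*', '*', '*', '2']),
]

-- cited by aGo's decreasing_by: every symbol is non-empty
theorem star_dollar_pairs_len : ∀ p ∈ star_dollar_pairs, 2 ≤ p.2.length := by decide

-- A's while-loop: at position i (here: the remaining suffix), scan the dict items in order
-- for the first symbol that equals text[i:i+len(symbol)]; on a hit append the letter and skip
-- the symbol, otherwise copy one character.
def aGo : List Char → String → String
  | [], acc => acc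
  | c :: rs, acc =>
    match h : star_dollar_pairs.find? (fun p => (c :: rs).take p.2.length == p.2) with
    | some (ch, sym) => aGo ((c :: rs).drop sym.length) (acc.push ch)
    | none => aGo rs (acc.push c)
termination_by rest => rest.length
decreasing_by
  all_goals first
    | (have h2 : 2 ≤ sym.length := star_dollar_pairs_len _ (List.mem_of_find?_eq_some h)
       simp only [List.length_drop, List.length_cons]; omega)
    | (simp only [List.length_cons]; omega)

def star_dollar_decrypt (text : String) : String := aGo text.toList ""

-- ===== PORT B =====
-- Source B's _COUNTS: the valid symbol counts for each of the two run characters, ascending.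
def dollarCounts : List Nat := [1, 2, 3, 4, 5, 6, 8, 9, 10, 11, 13, 14, 16]
def starCounts : List Nat := [1, 2, 4, 5, 6, 8, 9, 10, 11, 13, 14, 15, 16]
def countsFor (c : Char) : List Nat := if c = '$' then dollarCounts else starCounts

-- Source B's 'for j, kk in enumerate(counts): if kk <= L: k, idx = kk, j' loop
def pickGo (L : Nat) : List (Nat × Nat) → Nat × Nat → Nat × Nat
  | [], p => p
  | q :: qs, p => pickGo L qs (if q.1 ≤ L then (q.1, q.2) else p)

def pick (counts : List Nat) (L : Nat) : Nat × Nat := pickGo L counts.zipIdx (1, 0)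

-- Source B's pass 1: run-length encode the text into maximal (char, count) runs
def rle : List Char → List (Char × Nat)
  | [] => []
  | c :: rs => (c, (rs.takeWhile (· == c)).length + 1) :: rle (rs.dropWhile (· == c))
termination_by l => l.length
decreasing_by
  have := List.length_dropWhile_le (· == c) rs
  simp only [List.length_cons]; omega

-- Source B's pass 2: decode run by run; a star/dollar run before a digit run yields the letter of the
-- largest valid count ≤ the run length plus the leftover characters, and consumes one digit.
def decode : List (Char × Nat) → List Char → List Char
  | [], acc => acc
  | (c, L) :: rest, acc =>
    if c = '$' ∨ c = '*' then
      match rest with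
      | (d, m) :: rest2 =>
        if d = '1' ∨ d = '2' then
          if m = 1 then
            decode rest2 (acc ++ (List.replicate (L - (pick (countsFor c) L).1) c ++
              [Char.ofNat ((if d = '1' then 65 else 97) + 2 * (pick (countsFor c) L).2 +
                (if c = '*' then 1 else 0))]))
          else
            decode ((d, m - 1) :: rest2) (acc ++ (List.replicate (L - (pick (countsFor c) L).1) c ++
              [Char.ofNat ((if d = '1' then 65 else 97) + 2 * (pick (countsFor c) L).2 +
                (if c = '*' then 1 else 0))]))
        else decode ((d, m) :: rest2) (acc ++ List.replicate L c)
      | [] => acc ++ List.replicate L c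
    else decode rest (acc ++ List.replicate L c)
termination_by runs => runs.length

def star_dollar_decrypt_alt (text : String) : String := String.ofList (decode (rle text.toList) [])

-- ===== PRECONDITION & SPEC =====
def Spec_star_dollar_decrypt (text : String) (out : String) : Prop := out = star_dollar_decrypt_alt text
instance (text : String) (out : String) : Decidable (Spec_star_dollar_decrypt text out) := by unfold Spec_star_dollar_decrypt; infer_instance

-- ===== CLAIM (what is proved, stated in full; the proofs are below) =====
def Claim_equal_star_dollar_decrypt : Prop := ∀ (text : String), Dom_star_dollar_decrypt text → Spec_star_dollar_decrypt text (star_dollar_decrypt text)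

-- ===== LEMMAS AND PROOFS =====

-- the crux shared by both directions: "text[i:i+k+1] equals a run of k chars c followed by d" ⟺
-- "the maximal run of c at i has length exactly k and the character after it is d"
theorem take_eq_iff (l : List Char) (c d : Char) (k : Nat) (hcd : c ≠ d) :
    l.take (k + 1) = List.replicate k c ++ [d] ↔
      (l.takeWhile (· == c)).length = k ∧ l[k]? = some d := by
  constructor
  · intro h
    have hlen : k + 1 ≤ l.length := by
      have := congrArg List.length h
      simp at this; omega
    have hl : l = List.replicate k c ++ (d :: l.drop (k + 1)) := by
      conv_lhs => rw [← List.take_append_drop (k + 1) l]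
      rw [h]; simp
    constructor
    · conv_lhs => rw [hl]
      rw [List.takeWhile_append_of_pos (by intro x hx; simp [List.eq_of_mem_replicate hx])]
      simp [Ne.symm hcd]
    · conv_lhs => rw [hl]
      rw [List.getElem?_append_right (by simp)]
      simp
  · rintro ⟨h1, h2⟩
    have ht : l.takeWhile (· == c) = l.take k := by
      have := List.prefix_iff_eq_take.mp (List.takeWhile_prefix (l := l) (· == c))
      rw [h1] at this; exact this
    have hrep : l.take k = List.replicate k c := by
      rw [List.eq_replicate_iff]
      refine ⟨by rw [← ht, h1], ?_⟩
      intro b hb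
      rw [← ht] at hb
      have := List.mem_takeWhile_imp hb
      simpa using this
    rw [List.take_add_one, h2, hrep]
    rfl

theorem push_ofList (l : List Char) (c : Char) :
    (String.ofList l).push c = String.ofList (l ++ [c]) := by
  apply String.toList_injective; simp

-- the head of a dropWhile never satisfies the dropped predicate
theorem head_dropWhile_ne (l : List Char) (c : Char) : (l.dropWhile (· == c)).head? ≠ some c := by
  induction l with
  | nil => simp [List.dropWhile]
  | cons a u ih =>
    rw [List.dropWhile_cons]
    by_cases h : a = c
    · simpa [h] using ih
    · simp [h]

theorem run_split (t : Nat) (c : Char) (tail : List Char) (h : tail.head? ≠ some c) :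
    (List.replicate t c ++ tail).takeWhile (· == c) = List.replicate t c ∧
    (List.replicate t c ++ tail).dropWhile (· == c) = tail := by
  induction t with
  | zero =>
    simp only [List.replicate_zero, List.nil_append]
    cases tail with
    | nil => simp
    | cons a u =>
      have ha : a ≠ c := by intro hh; exact h (by simp [hh])
      simp [ha]
  | succ s ih =>
    obtain ⟨h1, h2⟩ := ih
    simp [List.replicate_succ, h1, h2]

theorem rle_run (t : Nat) (c : Char) (tail : List Char) (ht : 1 ≤ t) (h : tail.head? ≠ some c) :
    rle (List.replicate t c ++ tail) = (c, t) :: rle tail := by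
  obtain ⟨s, rfl⟩ : ∃ s, t = s + 1 := ⟨t - 1, by omega⟩
  obtain ⟨h1, h2⟩ := run_split s c tail h
  rw [List.replicate_succ, List.cons_append, rle, h1, h2, List.length_replicate]

theorem rle_cons_inv (xs : List Char) (d : Char) (m : Nat) (rest2 : List (Char × Nat))
    (h : rle xs = (d, m) :: rest2) :
    ∃ u, xs = d :: u ∧ m = (u.takeWhile (· == d)).length + 1 ∧ rest2 = rle (u.dropWhile (· == d)) := by
  cases xs with
  | nil => simp [rle] at h
  | cons a u =>
    rw [rle] at h
    simp only [List.cons.injEq, Prod.mk.injEq] at h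
    obtain ⟨⟨rfl, hm⟩, hrest⟩ := h
    exact ⟨u, rfl, hm.symm, hrest.symm⟩

-- pick on tables whose thresholds cannot tell L and L' apart
theorem pickGo_congr (L L' : Nat) (tab : List (Nat × Nat))
    (h : ∀ q ∈ tab, (q.1 ≤ L ↔ q.1 ≤ L')) : ∀ p, pickGo L tab p = pickGo L' tab p := by
  induction tab with
  | nil => intro p; rfl
  | cons q qs ih =>
    intro p
    rw [pickGo, pickGo, if_congr (h q (by simp)) rfl rfl]
    exact ih (fun r hr => h r (by simp [hr])) _

-- pick saturates at 16, the largest count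
theorem pick_sat (cts : List Nat) (hc : cts = dollarCounts ∨ cts = starCounts)
    (L : Nat) (hL : 16 ≤ L) : pick cts L = (16, 12) := by
  have h16 : pick cts 16 = (16, 12) := by rcases hc with rfl | rfl <;> decide
  have hall : ∀ q ∈ cts.zipIdx, q.1 ≤ 16 := by rcases hc with rfl | rfl <;> decide
  rw [← h16]
  unfold pick
  exact pickGo_congr L 16 cts.zipIdx
    (fun q hq => ⟨fun _ => hall q hq, fun _ => le_trans (hall q hq) hL⟩) _

theorem pick_fst_le (cts : List Nat) (hc : cts = dollarCounts ∨ cts = starCounts)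
    (L : Nat) (hL : 1 ≤ L) : (pick cts L).1 ≤ L := by
  by_cases h : L ≤ 16
  · rcases hc with rfl | rfl <;> interval_cases L <;> decide
  · rw [pick_sat cts hc L (by omega)]; omega

-- peeling one character off a run whose length is not a valid count does not change pick
theorem pick_peel (cts : List Nat) (hc : cts = dollarCounts ∨ cts = starCounts)
    (t : Nat) (h2 : 2 ≤ t) (hn : t ∉ cts) : pick cts t = pick cts (t - 1) := by
  by_cases h : t ≤ 16
  · rcases hc with rfl | rfl <;> interval_cases t <;>
      first | decide | (exact absurd (by decide) hn)
  · rw [pick_sat cts hc t (by omega), pick_sat cts hc (t - 1) (by omega)]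

-- the shape of every entry of A's symbol table, and B's arithmetic letter reconstruction
set_option maxRecDepth 40000 in
theorem fact_pairs2 : ∀ p ∈ star_dollar_pairs,
    2 ≤ p.2.length ∧
    p.2 = List.replicate (p.2.length - 1) p.2.head! ++ [p.2.getLast!] ∧
    (p.2.head! = '$' ∨ p.2.head! = '*') ∧
    (p.2.getLast! = '1' ∨ p.2.getLast! = '2') ∧
    (p.2.length - 1) ∈ countsFor p.2.head! ∧
    (pick (countsFor p.2.head!) (p.2.length - 1)).1 = p.2.length - 1 ∧
    Char.ofNat ((if p.2.getLast! = '1' then 65 else 97) +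
      2 * (pick (countsFor p.2.head!) (p.2.length - 1)).2 +
      (if p.2.head! = '*' then 1 else 0)) = p.1 := by decide

-- every valid (run char, count, digit) triple is realised by some symbol of A's table
set_option maxRecDepth 40000 in
theorem fact_exists (c : Char) (hc : c = '$' ∨ c = '*') (d : Char) (hd : d = '1' ∨ d = '2') :
    ∀ t ∈ countsFor c, (List.replicate t c ++ [d]) ∈ star_dollar_pairs.map Prod.snd := by
  rcases hc with rfl | rfl <;> rcases hd with rfl | rfl <;> decide

-- if a valid symbol starts at the head of l, A's find? cannot return none
theorem match_absurd (l : List Char) (c d : Char) (t : Nat)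
    (hc : c = '$' ∨ c = '*') (hd : d = '1' ∨ d = '2')
    (ht : (l.takeWhile (· == c)).length = t) (hidx : l[t]? = some d)
    (hmem : t ∈ countsFor c)
    (hall : ∀ p ∈ star_dollar_pairs, ¬ (l.take p.2.length == p.2) = true) : False := by
  have hmap : (List.replicate t c ++ [d]) ∈ star_dollar_pairs.map Prod.snd :=
    fact_exists c hc d hd t hmem
  obtain ⟨p, hp, hsym⟩ := List.mem_map.mp hmap

  have hcd : c ≠ d := by rcases hc with rfl | rfl <;> rcases hd with rfl | rfl <;> decide
  have htake : l.take (t + 1) = List.replicate t c ++ [d] :=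
    (take_eq_iff l c d t hcd).mpr ⟨ht, hidx⟩
  have hlen : p.2.length = t + 1 := by rw [hsym]; simp
  exact hall p hp (by rw [hlen, hsym, beq_iff_eq]; exact htake)


theorem getElem_run (t : Nat) (c : Char) (tail : List Char) :
    (List.replicate t c ++ tail)[t]? = tail.head? := by
  rw [List.getElem?_append_right (by simp)]
  simp [List.head?_eq_getElem?]

theorem countsFor_cases (c : Char) (hC : c = '$' ∨ c = '*') :
    countsFor c = dollarCounts ∨ countsFor c = starCounts := by
  rcases hC with rfl | rfl
  · left; rfl
  · right; rfl

-- unfolding equations for decode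
theorem decode_nil (acc : List Char) : decode [] acc = acc := by rw [decode.eq_def]

theorem decode_cons_not (c : Char) (L : Nat) (R : List (Char × Nat)) (acc : List Char)
    (hC : ¬(c = '$' ∨ c = '*')) :
    decode ((c, L) :: R) acc = decode R (acc ++ List.replicate L c) := by
  rw [decode.eq_def]; simp [hC]

theorem decode_cons_last (c : Char) (L : Nat) (acc : List Char) (hC : c = '$' ∨ c = '*') :
    decode [(c, L)] acc = acc ++ List.replicate L c := by
  rw [decode.eq_def]; simp [hC]

theorem decode_cons_nd (c : Char) (L : Nat) (d : Char) (m : Nat) (R : List (Char × Nat))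
    (acc : List Char) (hC : c = '$' ∨ c = '*') (hD : ¬(d = '1' ∨ d = '2')) :
    decode ((c, L) :: (d, m) :: R) acc = decode ((d, m) :: R) (acc ++ List.replicate L c) := by
  rw [decode.eq_def]; simp [hC, hD]

theorem decode_cons_hit (c : Char) (L : Nat) (d : Char) (m : Nat) (R : List (Char × Nat))
    (acc : List Char) (hC : c = '$' ∨ c = '*') (hD : d = '1' ∨ d = '2') :
    decode ((c, L) :: (d, m) :: R) acc =
      if m = 1 then
        decode R (acc ++ (List.replicate (L - (pick (countsFor c) L).1) c ++
          [Char.ofNat ((if d = '1' then 65 else 97) + 2 * (pick (countsFor c) L).2 +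
            (if c = '*' then 1 else 0))]))
      else
        decode ((d, m - 1) :: R) (acc ++ (List.replicate (L - (pick (countsFor c) L).1) c ++
          [Char.ofNat ((if d = '1' then 65 else 97) + 2 * (pick (countsFor c) L).2 +
            (if c = '*' then 1 else 0))])) := by
  rw [decode.eq_def]; simp [hC, hD]

-- peeling one leading character off a run that cannot start a symbol
theorem decode_peel (c : Char) (t : Nat) (R : List (Char × Nat)) (acc : List Char)
    (ht : 1 ≤ t)
    (hnm : ∀ d m rest2, R = (d, m) :: rest2 → (d = '1' ∨ d = '2') → (c = '$' ∨ c = '*') →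
      t ∉ countsFor c) :
    decode ((c, t) :: R) acc =
      if t = 1 then decode R (acc ++ [c]) else decode ((c, t - 1) :: R) (acc ++ [c]) := by
  obtain ⟨s, rfl⟩ : ∃ s, t = s + 1 := ⟨t - 1, by omega⟩
  have hacc : ∀ z : List Char, acc ++ (c :: z) = (acc ++ [c]) ++ z := by intro z; simp
  by_cases hs : s = 0
  · subst hs
    rw [if_pos rfl]
    by_cases hC : c = '$' ∨ c = '*'
    · cases R with
      | nil => rw [decode_cons_last c _ acc hC, decode_nil]; simp
      | cons q rest2 =>
        obtain ⟨d, m⟩ := q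
        by_cases hD : d = '1' ∨ d = '2'
        · exact absurd (by rcases hC with rfl | rfl <;> decide)
            (hnm d m rest2 rfl hD hC)
        · rw [decode_cons_nd c _ d m rest2 acc hC hD]; simp
    · rw [decode_cons_not c _ R acc hC]; simp
  · rw [if_neg (by omega), Nat.add_sub_cancel]
    by_cases hC : c = '$' ∨ c = '*'
    · cases R with
      | nil =>
        rw [decode_cons_last c _ acc hC, decode_cons_last c _ _ hC, List.replicate_succ, hacc]
      | cons q rest2 =>
        obtain ⟨d, m⟩ := q
        by_cases hD : d = '1' ∨ d = '2'
        · have hnot : (s + 1) ∉ countsFor c := hnm d m rest2 rfl hD hC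
          have hpeel : pick (countsFor c) (s + 1) = pick (countsFor c) s := by
            have := pick_peel (countsFor c) (countsFor_cases c hC) (s + 1) (by omega) hnot
            simpa using this
          have hle : (pick (countsFor c) s).1 ≤ s :=
            pick_fst_le (countsFor c) (countsFor_cases c hC) s (by omega)
          rw [decode_cons_hit c _ d m rest2 acc hC hD,
            decode_cons_hit c s d m rest2 (acc ++ [c]) hC hD, hpeel]
          have hrep2 : List.replicate (s + 1 - (pick (countsFor c) s).1) c =
              c :: List.replicate (s - (pick (countsFor c) s).1) c := by
            rw [show s + 1 - (pick (countsFor c) s).1 = (s - (pick (countsFor c) s).1) + 1 by omega,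
              List.replicate_succ]
          rw [hrep2, List.cons_append, hacc]
        · rw [decode_cons_nd c _ d m rest2 acc hC hD,
            decode_cons_nd c s d m rest2 (acc ++ [c]) hC hD, List.replicate_succ, hacc]
    · rw [decode_cons_not c _ R acc hC, decode_cons_not c s R (acc ++ [c]) hC,
        List.replicate_succ, hacc]

theorem drop_run (k : Nat) (c d : Char) (u : List Char) :
    (List.replicate k c ++ (d :: u)).drop (k + 1) = u := by
  induction k with
  | zero => simp
  | succ i ih => simpa [List.replicate_succ] using ih

theorem goEq : ∀ (n : Nat) (l acc : List Char), l.length ≤ n →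
    aGo l (String.ofList acc) = String.ofList (decode (rle l) acc) := by
  intro n
  induction n with
  | zero =>
    intro l acc h
    have hl : l = [] := by cases l <;> simp_all
    subst hl
    rw [aGo, rle, decode]
  | succ n ih =>
    intro l acc hlen
    match l with
    | [] => rw [aGo, rle, decode]
    | c :: rs =>
      have htw : (c :: rs).takeWhile (· == c) = c :: rs.takeWhile (· == c) := by
        simp
      have ht1 : 1 ≤ ((c :: rs).takeWhile (· == c)).length := by rw [htw]; simp
      have hrep : (c :: rs).takeWhile (· == c) =
          List.replicate ((c :: rs).takeWhile (· == c)).length c := by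
        rw [List.eq_replicate_iff]
        exact ⟨rfl, fun b hb => by simpa using List.mem_takeWhile_imp hb⟩
      have hsplit : c :: rs = List.replicate ((c :: rs).takeWhile (· == c)).length c ++
          (c :: rs).dropWhile (· == c) := by
        conv_lhs => rw [← List.takeWhile_append_dropWhile (p := (· == c)) (l := c :: rs)]
        rw [← hrep]
      have htail : (((c :: rs).dropWhile (· == c)).head?) ≠ some c := head_dropWhile_ne _ c
      have hrle : rle (c :: rs) =
          (c, ((c :: rs).takeWhile (· == c)).length) :: rle ((c :: rs).dropWhile (· == c)) := by
        conv_lhs => rw [hsplit]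
        exact rle_run _ c _ ht1 htail
      rw [aGo]
      split
      case _ ch sym hfind =>
        have hmem := List.mem_of_find?_eq_some hfind
        have hpred := List.find?_some hfind
        obtain ⟨hlen2, hshape, hhead, hlast, hcnt, hpick1, hletter⟩ := fact_pairs2 _ hmem
        dsimp only at hlen2 hshape hhead hlast hcnt hpick1 hletter
        simp only [beq_iff_eq] at hpred
        have hks : sym.length = (sym.length - 1) + 1 := by omega
        have heq : (c :: rs).take ((sym.length - 1) + 1)
            = List.replicate (sym.length - 1) sym.head! ++ [sym.getLast!] := by
          rw [← hks, hpred]; exact hshape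
        have hc : c = sym.head! := by
          obtain ⟨j, hj⟩ : ∃ j, sym.length - 1 = j + 1 := ⟨sym.length - 2, by omega⟩
          rw [hj] at heq
          have h0 := congrArg List.head? heq
          simpa using h0
        have hcd : c ≠ sym.getLast! := by
          rcases hhead with h1 | h1 <;> rcases hlast with h2 | h2 <;>
            rw [hc, h1, h2] <;> decide
        rw [← hc] at heq
        obtain ⟨hrun, hidx⟩ :=
          (take_eq_iff (c :: rs) c sym.getLast! (sym.length - 1) hcd).mp heq
        rw [← hc] at hpick1 hcnt hletter
        -- the character after the run is the digit sym.getLast!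
        have hheadtail : ((c :: rs).dropWhile (· == c)).head? = some sym.getLast! := by
          rw [← getElem_run ((c :: rs).takeWhile (· == c)).length c, ← hsplit, hrun]
          exact hidx
        obtain ⟨tail2, htail2⟩ : ∃ u, (c :: rs).dropWhile (· == c) = sym.getLast! :: u := by
          cases hE : (c :: rs).dropWhile (· == c) with
          | nil => rw [hE] at hheadtail; simp at hheadtail
          | cons b u =>
            rw [hE] at hheadtail
            simp only [List.head?_cons, Option.some.injEq] at hheadtail
            exact ⟨u, by rw [hheadtail]⟩
        have hrletail : rle ((c :: rs).dropWhile (· == c)) =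
            (sym.getLast!, (tail2.takeWhile (· == sym.getLast!)).length + 1) ::
              rle (tail2.dropWhile (· == sym.getLast!)) := by
          rw [htail2, rle]
        -- A drops the whole symbol: the run and the digit
        have hdrop : (c :: rs).drop sym.length = tail2 := by
          conv_lhs => rw [hsplit, htail2, hrun]
          have h := drop_run (sym.length - 1) c sym.getLast! tail2
          rw [← hks] at h
          exact h
        have hlen3 : tail2.length ≤ n := by
          have := congrArg List.length hsplit
          rw [htail2] at this
          simp only [List.length_cons, List.length_append, List.length_replicate] at this
          simp only [List.length_cons] at hlen
          omega
        rw [hrle, hrun, hrletail, hdrop, push_ofList]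
        rw [decode_cons_hit c (sym.length - 1) sym.getLast!
          ((tail2.takeWhile (· == sym.getLast!)).length + 1)
          (rle (tail2.dropWhile (· == sym.getLast!))) acc (hc ▸ hhead) hlast]
        rw [hpick1, hletter]
        simp only [Nat.sub_self, List.replicate_zero, List.nil_append]
        by_cases hm : (tail2.takeWhile (· == sym.getLast!)).length + 1 = 1
        · rw [if_pos hm]
          have htw0 : tail2.takeWhile (· == sym.getLast!) = [] := by
            rw [← List.length_eq_zero_iff]; omega
          have hdw : tail2.dropWhile (· == sym.getLast!) = tail2 := by
            conv_rhs => rw [← List.takeWhile_append_dropWhile (p := (· == sym.getLast!)) (l := tail2)]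
            rw [htw0, List.nil_append]
          rw [hdw]
          exact ih _ _ hlen3
        · rw [if_neg hm]
          -- the digit run loses one character; re-run-length-encode the rest
          obtain ⟨u2, hu2⟩ : ∃ u, tail2 = sym.getLast! :: u := by
            cases hE : tail2 with
            | nil => rw [hE] at hm; simp at hm
            | cons b u =>
              rw [hE] at hm
              by_cases hb : b = sym.getLast!
              · exact ⟨u, by rw [hb]⟩
              · rw [List.takeWhile_cons_of_neg (by simp only [beq_iff_eq]; exact hb)] at hm
                simp at hm
          have hrle2 : rle tail2 =
              (sym.getLast!, (tail2.takeWhile (· == sym.getLast!)).length + 1 - 1) ::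
                rle (tail2.dropWhile (· == sym.getLast!)) := by
            rw [hu2, rle, List.takeWhile_cons_of_pos (by simp), List.dropWhile_cons_of_pos (by simp)]
            simp
          rw [← hrle2]
          exact ih _ _ hlen3
      case _ hfind =>
        have hall := List.find?_eq_none.mp hfind
        rw [push_ofList, hrle]
        have hnm : ∀ d m rest2, rle ((c :: rs).dropWhile (· == c)) = (d, m) :: rest2 →
            (d = '1' ∨ d = '2') → (c = '$' ∨ c = '*') →
            ((c :: rs).takeWhile (· == c)).length ∉ countsFor c := by
          intro d m rest2 hR hD hC hmem
          obtain ⟨u, hu, _, _⟩ := rle_cons_inv _ _ _ _ hR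
          have hidx : (c :: rs)[((c :: rs).takeWhile (· == c)).length]? = some d := by
            have h := getElem_run ((c :: rs).takeWhile (· == c)).length c
              ((c :: rs).dropWhile (· == c))
            rw [← hsplit] at h
            rw [h, hu]
            rfl
          exact match_absurd (c :: rs) c d ((c :: rs).takeWhile (· == c)).length hC hD rfl
            hidx hmem (fun p hp h => by simpa using hall p hp h)
        rw [decode_peel c _ _ acc ht1 hnm]
        by_cases h1 : ((c :: rs).takeWhile (· == c)).length = 1
        · rw [if_pos h1]
          have htw0 : rs.takeWhile (· == c) = [] := by
            rw [htw] at h1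
            simpa using h1
          have hdw : (c :: rs).dropWhile (· == c) = rs := by
            rw [List.dropWhile_cons_of_pos (by simp)]
            conv_rhs => rw [← List.takeWhile_append_dropWhile (p := (· == c)) (l := rs)]
            rw [htw0, List.nil_append]
          rw [hdw]
          exact ih rs (acc ++ [c]) (by simp only [List.length_cons] at hlen; omega)
        · rw [if_neg h1]
          have hrs : rs = List.replicate (((c :: rs).takeWhile (· == c)).length - 1) c ++
              (c :: rs).dropWhile (· == c) := by
            have := hsplit
            obtain ⟨s, hs⟩ : ∃ s, ((c :: rs).takeWhile (· == c)).length = s + 1 :=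
              ⟨((c :: rs).takeWhile (· == c)).length - 1, by omega⟩
            rw [hs, List.replicate_succ, List.cons_append, List.cons.injEq] at this
            rw [hs]
            simpa using this.2
          have hrlers : rle rs = (c, ((c :: rs).takeWhile (· == c)).length - 1) ::
              rle ((c :: rs).dropWhile (· == c)) := by
            conv_lhs => rw [hrs]
            exact rle_run _ c _ (by omega) htail
          rw [← hrlers]
          exact ih rs (acc ++ [c]) (by simp only [List.length_cons] at hlen; omega)

-- ===== VERDICT (by name: the statement is the Claim_ definition above) =====
theorem star_dollar_decrypt_spec : Claim_equal_star_dollar_decrypt := by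
  intro text _
  unfold Spec_star_dollar_decrypt star_dollar_decrypt star_dollar_decrypt_alt
  have h : ("" : String) = String.ofList [] := String.empty_eq_iff.mpr rfl
  rw [h, goEq text.toList.length text.toList [] le_rfl]
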